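-- pv_equiv track=rewrite | github.com/X-leon1969/wookey | wookey-extract-docnr.py | pages_to_ranges
-- ===== SOURCE A (Python) =====
-- import itertools
-- from operator import itemgetter
--
-- def pages_to_ranges(pages):
--     """Convert a list of page numbers into a string of ranges."""
--     if not pages:
--         return ""
--     ranges = []
--     for k, g in itertools.groupby(enumerate(sorted(pages)), lambda x: x[0] - x[1]):
--         group = list(map(itemgetter(1), g))
--         range_str = f"{group[0]}-{group[-1]}" if len(group) > 1 else str(group[0])
--         ranges.append(range_str)
--     return ", ".join(ranges)
-- ===== SOURCE B (Python) =====
-- def pages_to_ranges(pages):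
--     """Convert a list of page numbers into a string of ranges."""
--     if not pages:
--         return ""
--     s = sorted(pages)
--     start = prev = s[0]
--     parts = []
--     for x in s[1:]:
--         if x == prev + 1:
--             prev = x
--         else:
--             parts.append(f"{start}-{prev}" if prev > start else str(start))
--             start = prev = x
--     parts.append(f"{start}-{prev}" if prev > start else str(start))
--     return ", ".join(parts)
-- ===== Notes on version B (the rewrite author's own statement) =====
-- stated objective: simpler
-- what changed: Replaces itertools.groupby over enumerate with an index-minus-value key (materialising each group as a list) by a single explicit scan that maintains an open run via start/prev and flushes it at each break.
import Mathlib
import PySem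

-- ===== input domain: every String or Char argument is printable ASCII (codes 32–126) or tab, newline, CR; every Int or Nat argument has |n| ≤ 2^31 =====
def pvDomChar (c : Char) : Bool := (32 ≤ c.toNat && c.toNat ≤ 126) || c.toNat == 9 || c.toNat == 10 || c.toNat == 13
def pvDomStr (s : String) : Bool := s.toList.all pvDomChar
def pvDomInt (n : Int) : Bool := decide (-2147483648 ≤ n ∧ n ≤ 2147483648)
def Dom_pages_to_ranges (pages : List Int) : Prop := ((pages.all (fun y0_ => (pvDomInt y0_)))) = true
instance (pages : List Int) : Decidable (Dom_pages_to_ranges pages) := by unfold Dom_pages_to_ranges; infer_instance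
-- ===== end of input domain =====

-- B replaces itertools.groupby-with-(index-minus-value)-key by an explicit open-run (start/prev) scan; objective: simpler.

-- ===== PORT A =====
-- itertools.groupby helper: consume the maximal prefix of the enumerated list whose key (i - x) equals k
def takeGroup (k : Int) : List (Int × Int) → List (Int × Int) × List (Int × Int)
  | [] => ([], [])
  | (i, x) :: rest =>
      if i - x = k then
        let p := takeGroup k rest
        ((i, x) :: p.1, p.2)
      else ([], (i, x) :: rest)

lemma takeGroup_snd_length (k : Int) : ∀ l : List (Int × Int), (takeGroup k l).2.length ≤ l.length
  | [] => by simp [takeGroup]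
  | (i, x) :: rest => by
      simp only [takeGroup]
      split
      · exact Nat.le_succ_of_le (takeGroup_snd_length k rest)
      · simp

-- itertools.groupby(l, key=lambda p: p[0] - p[1]) as the list of groups
def groupsA : List (Int × Int) → List (List (Int × Int))
  | [] => []
  | (i, x) :: rest =>
      let p := takeGroup (i - x) rest
      ((i, x) :: p.1) :: groupsA p.2
  termination_by l => l.length
  decreasing_by simpa using Nat.lt_succ_of_le (takeGroup_snd_length (i - x) rest)

-- range_str for one group's page numbers (groupby groups are nonempty, so group[0]/group[-1]
-- are read exactly by headD/getLastD with an unused default)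
def rangeStrA (g : List Int) : String :=
  if g.length > 1 then PySem.Int.toStr (g.headD 0) ++ "-" ++ PySem.Int.toStr (g.getLastD 0)
  else PySem.Int.toStr (g.headD 0)

def pages_to_ranges (pages : List Int) : String :=
  if pages = [] then ""
  else
    let ranges := (groupsA (PySem.List.enumerate (PySem.List.sorted pages (fun x => x) false) 0)).map
      (fun g => rangeStrA (g.map Prod.snd))
    PySem.Str.join ", " ranges

-- ===== PORT B =====
-- f"{start}-{prev}" if prev > start else str(start)
def fmtB (start prev : Int) : String :=
  if prev > start then PySem.Int.toStr start ++ "-" ++ PySem.Int.toStr prev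
  else PySem.Int.toStr start

def pages_to_ranges_alt (pages : List Int) : String :=
  if pages = [] then ""
  else
    let s := PySem.List.sorted pages (fun x => x) false
    let start0 := PySem.List.pyGetD s 0 0   -- s[0]; s nonempty under the guard
    let st := (s.drop 1).foldl
      (fun (st : (Int × Int) × List String) x =>
        if x = st.1.2 + 1 then ((st.1.1, x), st.2)
        else ((x, x), st.2 ++ [fmtB st.1.1 st.1.2]))
      ((start0, start0), ([] : List String))
    PySem.Str.join ", " (st.2 ++ [fmtB st.1.1 st.1.2])

-- ===== PRECONDITION & SPEC =====
def Spec_pages_to_ranges (pages : List Int) (out : String) : Prop := out = pages_to_ranges_alt pages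
instance (pages : List Int) (out : String) : Decidable (Spec_pages_to_ranges pages out) := by unfold Spec_pages_to_ranges; infer_instance

-- ===== CLAIM (what is proved, stated in full; the proofs are below) =====
def Claim_equal_pages_to_ranges : Prop := ∀ (pages : List Int), Dom_pages_to_ranges pages → Spec_pages_to_ranges pages (pages_to_ranges pages)

-- ===== LEMMAS AND PROOFS =====

-- length of the maximal chain prev+1, prev+2, … at the head of the list
def runLen (p : Int) : List Int → Nat
  | [] => 0
  | x :: r => if x = p + 1 then runLen x r + 1 else 0

-- B's loop body as forward recursion on (start, prev)
def partsB (start prev : Int) : List Int → List String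
  | [] => [fmtB start prev]
  | x :: r => if x = prev + 1 then partsB start x r else fmtB start prev :: partsB x x r

lemma takeGroup_enumerate (r : List Int) : ∀ (i p : Int),
    takeGroup (i - (p + 1)) (PySem.List.enumerate r i)
      = (PySem.List.enumerate (r.take (runLen p r)) i,
         PySem.List.enumerate (r.drop (runLen p r)) (i + runLen p r)) := by
  induction r with
  | nil => intro i p; simp [takeGroup, runLen, PySem.List.enumerate_nil]
  | cons x r ih =>
      intro i p
      rw [PySem.List.enumerate_cons]
      by_cases hx : x = p + 1
      · have hcond : i - x = i - (p + 1) := by omega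
        have hrl : runLen p (x :: r) = runLen x r + 1 := by simp [runLen, hx]
        rw [hrl]
        simp only [takeGroup]
        rw [if_pos hcond]
        have h2 : i - (p + 1) = (i + 1) - (x + 1) := by omega
        rw [h2, ih (i + 1) x]
        simp only [List.take_succ_cons, List.drop_succ_cons, PySem.List.enumerate_cons]
        have h3 : i + 1 + ((runLen x r : Nat) : Int) = i + ((runLen x r + 1 : Nat) : Int) := by
          push_cast; ring
        rw [h3]
      · have hcond : ¬ i - x = i - (p + 1) := by omega
        have hrl : runLen p (x :: r) = 0 := by simp [runLen, hx]
        rw [hrl]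
        simp only [takeGroup]
        rw [if_neg hcond]
        simp [PySem.List.enumerate_cons]

lemma runLen_le (r : List Int) : ∀ p, runLen p r ≤ r.length := by
  induction r with
  | nil => intro p; simp [runLen]
  | cons x r ih =>
      intro p
      by_cases hx : x = p + 1
      · simp only [runLen, if_pos hx, List.length_cons]
        exact Nat.succ_le_succ (ih x)
      · simp [runLen, hx]

lemma chain_getLastD (r : List Int) : ∀ (x : Int),
    (r.take (runLen x r)).getLastD x = x + runLen x r := by
  induction r with
  | nil => intro x; simp [runLen]
  | cons y r ih =>
      intro x
      by_cases hy : y = x + 1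
      · simp only [runLen, if_pos hy, List.take_succ_cons, List.getLastD_cons]
        rw [ih y]
        push_cast; omega
      · simp [runLen, hy]

lemma rangeStrA_chain (x : Int) (r : List Int) :
    rangeStrA (x :: r.take (runLen x r)) = fmtB x (x + runLen x r) := by
  have hlen : (r.take (runLen x r)).length = runLen x r :=
    List.length_take_of_le (runLen_le r x)
  have hlast : (x :: r.take (runLen x r)).getLastD 0 = x + runLen x r := by
    rw [List.getLastD_cons]; exact chain_getLastD r x
  rcases Nat.eq_zero_or_pos (runLen x r) with h0 | hpos
  · rw [h0]
    simp [rangeStrA, fmtB]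
  · rw [rangeStrA, if_pos (by simp only [List.length_cons, hlen]; omega)]
    rw [show (x :: r.take (runLen x r)).headD 0 = x from rfl, hlast]
    rw [fmtB, if_pos (by omega)]

lemma partsB_run (r : List Int) : ∀ (start prev : Int),
    partsB start prev r =
      match r.drop (runLen prev r) with
      | [] => [fmtB start (prev + runLen prev r)]
      | y :: r' => fmtB start (prev + runLen prev r) :: partsB y y r' := by
  induction r with
  | nil => intro start prev; simp [partsB, runLen]
  | cons x r ih =>
      intro start prev
      by_cases hx : x = prev + 1
      · simp only [partsB, if_pos hx, runLen, List.drop_succ_cons]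
        rw [ih start x]
        rw [show prev + ((runLen x r + 1 : Nat) : Int) = x + runLen x r by push_cast; omega]
      · simp [partsB, hx, runLen]

lemma groupsA_eq_partsB : ∀ (n : Nat) (r : List Int), r.length ≤ n → ∀ (i x : Int),
    (groupsA (PySem.List.enumerate (x :: r) i)).map (fun g => rangeStrA (g.map Prod.snd))
      = partsB x x r := by
  intro n
  induction n with
  | zero =>
      intro r hr i x
      have : r = [] := List.eq_nil_of_length_eq_zero (Nat.le_zero.mp hr)
      subst this
      simp [groupsA, takeGroup, rangeStrA, partsB, fmtB, PySem.List.enumerate_cons,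
            PySem.List.enumerate_nil]
  | succ n ih =>
      intro r hr i x
      rw [PySem.List.enumerate_cons, groupsA]
      have hk : i - x = (i + 1) - (x + 1) := by omega
      rw [hk, takeGroup_enumerate r (i + 1) x]
      simp only [List.map_cons, List.map_cons]
      set c := runLen x r with hc
      have hsnd : (PySem.List.enumerate (r.take c) (i + 1)).map Prod.snd = r.take c := by
        simp [PySem.List.map_snd_enumerate]
      rw [hsnd, rangeStrA_chain x r]
      rw [partsB_run r x x]
      cases hd : r.drop c with
      | nil =>
          simp only [PySem.List.enumerate_nil, groupsA, List.map_nil]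
      | cons y r' =>
          congr 1
          have hr' : r'.length ≤ n := by
            have h1 := congrArg List.length hd
            simp [List.length_drop] at h1
            omega
          exact ih r' hr' (i + 1 + c) y

-- B's loop body, named for the proofs (definitionally the lambda in the port)
def stepB (st : (Int × Int) × List String) (x : Int) : (Int × Int) × List String :=
  if x = st.1.2 + 1 then ((st.1.1, x), st.2) else ((x, x), st.2 ++ [fmtB st.1.1 st.1.2])

lemma foldlB (r : List Int) : ∀ (start prev : Int) (acc : List String),
    (r.foldl stepB ((start, prev), acc)).2
      ++ [fmtB (r.foldl stepB ((start, prev), acc)).1.1 (r.foldl stepB ((start, prev), acc)).1.2]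
      = acc ++ partsB start prev r := by
  induction r with
  | nil => intro start prev acc; simp [partsB]
  | cons x r ih =>
      intro start prev acc
      simp only [List.foldl_cons, stepB]
      by_cases hx : x = prev + 1
      · rw [if_pos hx, ih start x acc]
        simp [partsB, hx]
      · rw [if_neg hx, ih x x (acc ++ [fmtB start prev])]
        simp [partsB, hx]

-- ===== VERDICT (by name: the statement is the Claim_ definition above) =====
theorem pages_to_ranges_spec : Claim_equal_pages_to_ranges := by
  intro pages _
  unfold Spec_pages_to_ranges pages_to_ranges pages_to_ranges_alt
  by_cases hp : pages = []
  · simp [hp]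
  · rw [if_neg hp, if_neg hp]
    obtain ⟨x, r, hsl⟩ : ∃ x r, PySem.List.sorted pages (fun x => x) false = x :: r := by
      cases h : PySem.List.sorted pages (fun x => x) false with
      | nil => exact absurd ((PySem.List.sorted_eq_nil_iff _ _ _).mp h) hp
      | cons a b => exact ⟨a, b, rfl⟩
    simp only [hsl, List.drop_succ_cons, List.drop_zero, PySem.List.pyGetD_zero_cons]
    rw [show (fun (st : (Int × Int) × List String) x =>
        if x = st.1.2 + 1 then ((st.1.1, x), st.2)
        else ((x, x), st.2 ++ [fmtB st.1.1 st.1.2])) = stepB from rfl]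
    rw [foldlB r x x [], groupsA_eq_partsB r.length r (le_refl _) 0 x]
    simp
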